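-- pv_equiv track=rewrite | github.com/JakubKazimierski/PythonPortfolio | Coderbyte_algorithms/Hard/ArrayJumping/ArrayJumping.py | ArrayJumping
-- ===== SOURCE A (Python) =====
-- import copy
--
-- def ArrayJumping(arr):
--     '''
--     Have the function ArrayJumping(arr)
--     take the array of numbers stored in
--     arr and first determine the largest
--     element in the array, and then determine
--     whether or not you can reach that same
--     element within the array by moving left
--     or right continuously according to whatever
--     integer is in the current spot. If you can
--     reach the same spot within the array,
--     then your program should output the least
--     amount of jumps it took.
--
--     For example: if the input is [2, 3, 5, 6, 1]
--     you'll start at the spot where 6 is and if you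
--     jump 6 spaces to the right while looping around
--     the array you end up at the last element where the
--     1 is. Then from here you jump 1 space to the left
--     and you're back where you started, so your program
--     should output 2. If it's impossible to end up back
--     at the largest element in the array your program
--     should output -1. The largest element in the array
--     will never equal the number of elements in the array.
--     The largest element will be unique.
--     '''
--
--     max_elem = max(arr)
--
--     elems = [(max_elem, arr.index(max_elem))]
--     visited = [(max_elem, arr.index(max_elem))]
--     count = 0
--     while True:
--         nextElems = []
--         # all possibilities from point are counted as 1
--         for elem in elems:
--             right = (elem[1] + elem[0]) % len(arr)
--             left = (elem[1] - elem[0]) % len(arr)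
--             nextElems.append((arr[left], left))
--             nextElems.append((arr[right], right))
--         elems = copy.copy(nextElems)
--
--         count += 1
--         if (max_elem, arr.index(max_elem))  in elems:
--             break
--
--         # if each elem in array + 1 could be checked and max was not found (but i'm not 100% sure)
--         if count > len(arr)+1:
--           count = -1
--           break
--
--     return count
-- ===== SOURCE B (Python) =====
-- def ArrayJumping(arr):
--     """BFS over indices with a visited set: each index is expanded at most once,
--     and a shortest return walk revisits no index, so at most n levels suffice."""
--     n = len(arr)
--     start = arr.index(max(arr))
--     visited = {start}
--     frontier = [start]
--     for count in range(1, n + 1):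
--         moves = [(i + arr[i]) % n for i in frontier] + [(i - arr[i]) % n for i in frontier]
--         if start in moves:
--             return count
--         frontier = []
--         for j in moves:
--             if j not in visited:
--                 visited.add(j)
--                 frontier.append(j)
--     return -1
-- ===== Notes on version B (the rewrite author's own statement) =====
-- stated objective: faster
-- what changed: A expands an exponentially growing list of (value,index) pairs level by level and stops via a count cap; B runs a breadth-first search over the n indices with a visited set and a deduplicated frontier, bounded by n levels since a shortest return walk revisits no index, so each index is expanded at most once.
import Mathlib
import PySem

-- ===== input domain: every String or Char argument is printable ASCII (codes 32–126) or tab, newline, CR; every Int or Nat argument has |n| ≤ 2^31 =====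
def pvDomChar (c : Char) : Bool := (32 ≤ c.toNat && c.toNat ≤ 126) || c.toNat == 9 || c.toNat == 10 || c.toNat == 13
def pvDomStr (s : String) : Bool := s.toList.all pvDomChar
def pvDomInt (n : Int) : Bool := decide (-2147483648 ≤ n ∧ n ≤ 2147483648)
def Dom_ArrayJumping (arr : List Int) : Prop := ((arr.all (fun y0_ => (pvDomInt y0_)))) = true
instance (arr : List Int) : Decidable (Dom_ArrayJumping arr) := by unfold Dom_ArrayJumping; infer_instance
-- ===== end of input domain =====

-- B replaces A's exponentially growing list of (value, index) pairs by a breadth-first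
-- search over at most n levels whose visited set expands each index at most once (alternative algorithm; asymptotically less work per level).


-- ===== PORT A =====
-- the 'for elem in elems: nextElems.append(...)' pass of A's loop body
def nextElemsA (arr : List Int) (elems : List (Int × Int)) : List (Int × Int) :=
  elems.foldl (fun acc e =>
      let right := PySem.Int.mod (e.2 + e.1) (arr.length : Int)
      let left := PySem.Int.mod (e.2 - e.1) (arr.length : Int)
      acc ++ [(PySem.List.pyGetD arr left 0, left), (PySem.List.pyGetD arr right 0, right)]) []

-- the 'while True' loop of A: elems is the list of (value, index) pairs, count the jump count
def ArrayJumpingLoop (arr : List Int) (maxE idx : Int) (elems : List (Int × Int)) (count : Int) : Int :=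
  let nextElems := nextElemsA arr elems
  let count' := count + 1
  if (maxE, idx) ∈ nextElems then count'
  else if count' > (arr.length : Int) + 1 then -1
  else ArrayJumpingLoop arr maxE idx nextElems count'
termination_by ((arr.length : Int) + 2 - count).toNat
decreasing_by omega

def ArrayJumping (arr : List Int) : Int :=
  match PySem.List.max? arr (fun x => x) with
  | none => 0   -- Python's max([]) raises ValueError; excluded by Pre_
  | some maxE =>
    let idx : Int := ((PySem.List.index? arr maxE).getD 0 : Nat)
    ArrayJumpingLoop arr maxE idx [(maxE, idx)] 0

-- ===== PORT B =====
-- B's moves list: '[(i + arr[i]) % n for i in frontier] + [(i - arr[i]) % n for i in frontier]'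
def movesB (arr : List Int) (frontier : List Int) : List Int :=
  frontier.map (fun i => PySem.Int.mod (i + PySem.List.pyGetD arr i 0) (arr.length : Int)) ++
  frontier.map (fun i => PySem.Int.mod (i - PySem.List.pyGetD arr i 0) (arr.length : Int))

-- B's pruning pass: 'frontier = []; for j in moves: if j not in visited: visited.add(j); frontier.append(j)'
def pruneB (visited : PySem.Set Int) (moves : List Int) : PySem.Set Int × List Int :=
  moves.foldl (fun vf j =>
    if PySem.Set.contains vf.1 j then vf else (PySem.Set.add vf.1 j, vf.2 ++ [j])) (visited, [])

-- B's 'for count in range(1, n + 1)' loop; counts is the remaining range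
def ArrayJumpingAltLoop (arr : List Int) (start : Int) :
    List Int → PySem.Set Int → List Int → Int
  | [], _, _ => -1
  | count :: rest, visited, frontier =>
    let moves := movesB arr frontier
    if start ∈ moves then count
    else
      let vf := pruneB visited moves
      ArrayJumpingAltLoop arr start rest vf.1 vf.2

def ArrayJumping_alt (arr : List Int) : Int :=
  match PySem.List.max? arr (fun x => x) with
  | none => 0   -- Python's max([]) raises ValueError; excluded by Pre_
  | some maxE =>
    let start : Int := ((PySem.List.index? arr maxE).getD 0 : Nat)
    ArrayJumpingAltLoop arr start (PySem.List.pyRange 1 ((arr.length : Int) + 1) 1)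
      (PySem.Set.ofList [start]) [start]

-- ===== PRECONDITION & SPEC =====
-- Pre_ excludes only the empty list, on which Python's max(arr) raises ValueError.
def Pre_ArrayJumping (arr : List Int) : Prop := arr ≠ []
instance (arr : List Int) : Decidable (Pre_ArrayJumping arr) := by unfold Pre_ArrayJumping; infer_instance
def pvWitness_ArrayJumping : List Int := [2, 3, 5, 6, 1]

def Spec_ArrayJumping (arr : List Int) (out : Int) : Prop := out = ArrayJumping_alt arr
instance (arr : List Int) (out : Int) : Decidable (Spec_ArrayJumping arr out) := by unfold Spec_ArrayJumping; infer_instance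

-- ===== CLAIM (what is proved, stated in full; the proofs are below) =====
def Claim_equal_ArrayJumping : Prop := ∀ (arr : List Int), Dom_ArrayJumping arr → Pre_ArrayJumping arr → Spec_ArrayJumping arr (ArrayJumping arr)

-- ===== LEMMAS AND PROOFS =====

-- the two jump moves, and the exact-level reachability sets E k (level k of the walk tree)
def fR (arr : List Int) (i : Int) : Int := PySem.Int.mod (i + PySem.List.pyGetD arr i 0) (arr.length : Int)
def fL (arr : List Int) (i : Int) : Int := PySem.Int.mod (i - PySem.List.pyGetD arr i 0) (arr.length : Int)

def stepF (arr : List Int) (S : Finset Int) : Finset Int := S.image (fR arr) ∪ S.image (fL arr)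

def Ek (arr : List Int) (start : Int) : Nat → Finset Int
  | 0 => {start}
  | k + 1 => stepF arr (Ek arr start k)

-- B's frontier/visited sets at each level, as abstract finsets
def FV (arr : List Int) (start : Int) : Nat → Finset Int × Finset Int
  | 0 => ({start}, {start})
  | k + 1 =>
    let p := FV arr start k
    (stepF arr p.1 \ p.2, p.2 ∪ stepF arr p.1)

def Uk (arr : List Int) (start : Int) (k : Nat) : Finset Int := (Finset.range k).biUnion (Ek arr start)

-- indices a move can produce
def IdxSet (arr : List Int) : Finset Int := (Finset.range arr.length).image (fun i : Nat => (i : Int))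

-- A's list of pairs represents a finset S of indices, each paired with its value
def InvA (arr : List Int) (elems : List (Int × Int)) (S : Finset Int) : Prop :=
  (∀ p ∈ elems, p.1 = PySem.List.pyGetD arr p.2 0) ∧
  (∀ j : Int, (∃ p ∈ elems, p.2 = j) ↔ j ∈ S)

def NoHit (arr : List Int) (start : Int) (k : Nat) : Prop :=
  ∀ i : Nat, 1 ≤ i → i ≤ k → start ∉ Ek arr start i

theorem mem_stepF (arr : List Int) (S : Finset Int) (j : Int) :
    j ∈ stepF arr S ↔ ∃ u ∈ S, j = fR arr u ∨ j = fL arr u := by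
  unfold stepF
  simp only [Finset.mem_union, Finset.mem_image]
  constructor
  · rintro (⟨u, hu, rfl⟩ | ⟨u, hu, rfl⟩)
    · exact ⟨u, hu, Or.inl rfl⟩
    · exact ⟨u, hu, Or.inr rfl⟩
  · rintro ⟨u, hu, rfl | rfl⟩
    · exact Or.inl ⟨u, hu, rfl⟩
    · exact Or.inr ⟨u, hu, rfl⟩

theorem stepF_mono (arr : List Int) {S T : Finset Int} (h : S ⊆ T) :
    stepF arr S ⊆ stepF arr T := by
  intro j hj
  rw [mem_stepF] at hj ⊢
  obtain ⟨u, hu, hj⟩ := hj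
  exact ⟨u, h hu, hj⟩

theorem mem_nextElemsA (arr : List Int) (elems : List (Int × Int)) (p : Int × Int) :
    p ∈ nextElemsA arr elems ↔ ∃ e ∈ elems,
      p = (PySem.List.pyGetD arr (PySem.Int.mod (e.2 - e.1) (arr.length : Int)) 0,
           PySem.Int.mod (e.2 - e.1) (arr.length : Int)) ∨
      p = (PySem.List.pyGetD arr (PySem.Int.mod (e.2 + e.1) (arr.length : Int)) 0,
           PySem.Int.mod (e.2 + e.1) (arr.length : Int)) := by
  unfold nextElemsA
  rw [PySem.List.foldl_append_eq_flatMap]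
  simp [List.mem_flatMap]

theorem invA_step (arr : List Int) (elems : List (Int × Int)) (S : Finset Int)
    (h : InvA arr elems S) : InvA arr (nextElemsA arr elems) (stepF arr S) := by
  obtain ⟨hval, hset⟩ := h
  constructor
  · intro p hp
    rw [mem_nextElemsA] at hp
    obtain ⟨e, _, hp | hp⟩ := hp <;> (subst hp; rfl)
  · intro j
    rw [mem_stepF]
    constructor
    · rintro ⟨p, hp, hpj⟩
      rw [mem_nextElemsA] at hp
      obtain ⟨e, he, hp | hp⟩ := hp
      · refine ⟨e.2, (hset e.2).mp ⟨e, he, rfl⟩, Or.inr ?_⟩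
        rw [← hpj]; subst hp
        show PySem.Int.mod (e.2 - e.1) (arr.length : Int) = fL arr e.2
        rw [hval e he]; rfl
      · refine ⟨e.2, (hset e.2).mp ⟨e, he, rfl⟩, Or.inl ?_⟩
        rw [← hpj]; subst hp
        show PySem.Int.mod (e.2 + e.1) (arr.length : Int) = fR arr e.2
        rw [hval e he]; rfl
    · rintro ⟨u, hu, rfl | rfl⟩
      · obtain ⟨e, he, he2⟩ := (hset u).mpr hu
        refine ⟨(PySem.List.pyGetD arr (PySem.Int.mod (e.2 + e.1) (arr.length : Int)) 0,
                 PySem.Int.mod (e.2 + e.1) (arr.length : Int)),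
                (mem_nextElemsA arr elems _).mpr ⟨e, he, Or.inr rfl⟩, ?_⟩
        show PySem.Int.mod (e.2 + e.1) (arr.length : Int) = fR arr u
        rw [hval e he, he2]; rfl
      · obtain ⟨e, he, he2⟩ := (hset u).mpr hu
        refine ⟨(PySem.List.pyGetD arr (PySem.Int.mod (e.2 - e.1) (arr.length : Int)) 0,
                 PySem.Int.mod (e.2 - e.1) (arr.length : Int)),
                (mem_nextElemsA arr elems _).mpr ⟨e, he, Or.inl rfl⟩, ?_⟩
        show PySem.Int.mod (e.2 - e.1) (arr.length : Int) = fL arr u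
        rw [hval e he, he2]; rfl

theorem invA_found_iff (arr : List Int) (maxE idx : Int)
    (hIdx : PySem.List.pyGetD arr idx 0 = maxE)
    (elems : List (Int × Int)) (S : Finset Int) (h : InvA arr elems S) :
    ((maxE, idx) ∈ elems) ↔ idx ∈ S := by
  obtain ⟨hval, hset⟩ := h
  constructor
  · intro hmem
    exact (hset idx).mp ⟨(maxE, idx), hmem, rfl⟩
  · intro hS
    obtain ⟨p, hp, hpj⟩ := (hset idx).mpr hS
    have hv := hval p hp
    have : p = (maxE, idx) := by
      obtain ⟨p1, p2⟩ := p
      simp only at hpj hv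
      subst hpj; rw [hv, hIdx]
    rwa [this] at hp

-- B's moves list carries exactly the step image of the frontier
theorem toFinset_movesB (arr : List Int) (frontier : List Int) :
    (movesB arr frontier).toFinset = stepF arr frontier.toFinset := by
  unfold movesB stepF fR fL
  rw [List.toFinset_append]
  congr 1 <;> (ext x; simp)

-- the pruning fold: final visited = visited ∪ moves, frontier = the new elements
theorem pruneB_spec (arr : List Int) (visited : PySem.Set Int) (moves : List Int) :
    (pruneB visited moves).1.toFinset = visited.toFinset ∪ moves.toFinset ∧
    (pruneB visited moves).2.toFinset = moves.toFinset \ visited.toFinset := by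
  have key : ∀ (ms : List Int) (vs : PySem.Set Int) (acc : List Int),
      (ms.foldl (fun vf j =>
        if PySem.Set.contains vf.1 j then vf else (PySem.Set.add vf.1 j, vf.2 ++ [j])) (vs, acc)).1.toFinset
        = vs.toFinset ∪ ms.toFinset ∧
      (ms.foldl (fun vf j =>
        if PySem.Set.contains vf.1 j then vf else (PySem.Set.add vf.1 j, vf.2 ++ [j])) (vs, acc)).2.toFinset
        = acc.toFinset ∪ (ms.toFinset \ vs.toFinset) := by
    intro ms
    induction ms with
    | nil => intro vs acc; simp
    | cons j rest ih =>
      intro vs acc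
      by_cases hj : j ∈ vs
      · have hc : PySem.Set.contains vs j = true := (PySem.Set.contains_iff vs j).mpr hj
        simp only [List.foldl_cons, hc, if_true]
        obtain ⟨h1, h2⟩ := ih vs acc
        have hj' : j ∈ vs.toFinset := by simpa using hj
        refine ⟨?_, ?_⟩
        · rw [h1]; ext x
          simp only [Finset.mem_union, List.mem_toFinset, List.toFinset_cons, Finset.mem_insert]
          by_cases hxj : x = j <;> simp [hxj] <;> tauto
        · rw [h2]; ext x
          simp only [Finset.mem_union, Finset.mem_sdiff, List.mem_toFinset,
            List.toFinset_cons, Finset.mem_insert]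
          by_cases hxj : x = j <;> simp [hxj] <;> tauto
      · have hc : PySem.Set.contains vs j = false := by
          rw [← Bool.not_eq_true, PySem.Set.contains_iff]; exact hj
        simp only [List.foldl_cons, hc, Bool.false_eq_true, if_false]
        obtain ⟨h1, h2⟩ := ih (PySem.Set.add vs j) (acc ++ [j])
        have hadd : (PySem.Set.add vs j).toFinset = insert j vs.toFinset := by
          rw [PySem.Set.add_of_not_mem hj]; ext x; simp [or_comm]
        have hj' : j ∉ vs.toFinset := by simpa using hj
        refine ⟨?_, ?_⟩
        · rw [h1, hadd]; ext x
          simp only [Finset.mem_union, Finset.mem_insert, List.mem_toFinset, List.toFinset_cons]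
          tauto
        · rw [h2, hadd]; ext x
          simp only [List.toFinset_append, Finset.mem_union, List.mem_toFinset,
            List.toFinset_cons, List.mem_singleton, Finset.mem_sdiff, Finset.mem_insert,
            List.toFinset_nil, Finset.notMem_empty, or_false, false_or]
          by_cases hxj : x = j <;> simp [hxj] <;> tauto
  exact key moves visited []

theorem Uk_succ (arr : List Int) (start : Int) (k : Nat) :
    Uk arr start (k + 1) = Uk arr start k ∪ Ek arr start k := by
  unfold Uk
  ext x
  simp only [Finset.mem_biUnion, Finset.mem_range, Finset.mem_union]
  constructor
  · rintro ⟨i, hi, hx⟩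
    by_cases hik : i = k
    · subst hik; exact Or.inr hx
    · exact Or.inl ⟨i, by omega, hx⟩
  · rintro (⟨i, hi, hx⟩ | hx)
    · exact ⟨i, by omega, hx⟩
    · exact ⟨k, by omega, hx⟩

theorem mem_Uk (arr : List Int) (start : Int) (k : Nat) (j : Int) :
    j ∈ Uk arr start k ↔ ∃ i < k, j ∈ Ek arr start i := by
  unfold Uk; simp [Finset.mem_biUnion]

-- if v is one move beyond Ek k but new at level k+1, its parent is new at level k
theorem cover_step (arr : List Int) (start : Int) (k : Nat) :
    Ek arr start (k + 1) \ Uk arr start (k + 1) ⊆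
      stepF arr (Ek arr start k \ Uk arr start k) := by
  intro v hv
  obtain ⟨hvE, hvU⟩ := Finset.mem_sdiff.mp hv
  obtain ⟨u, hu, hmove⟩ := (mem_stepF arr _ v).mp hvE
  have hunew : u ∉ Uk arr start k := by
    intro huU
    obtain ⟨i, hik, hui⟩ := (mem_Uk arr start k u).mp huU
    have : v ∈ Ek arr start (i + 1) :=
      (mem_stepF arr _ v).mpr ⟨u, hui, hmove⟩
    exact hvU ((mem_Uk arr start (k + 1) v).mpr ⟨i + 1, by omega, this⟩)
  exact (mem_stepF arr _ v).mpr ⟨u, Finset.mem_sdiff.mpr ⟨hu, hunew⟩, hmove⟩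

-- characterisation of B's abstract frontier/visited pair
theorem FV_spec (arr : List Int) (start : Int) (k : Nat) :
    (FV arr start k).1 = Ek arr start k \ Uk arr start k ∧
    (FV arr start k).2 = Uk arr start (k + 1) := by
  induction k with
  | zero =>
    constructor
    · show ({start} : Finset Int) = Ek arr start 0 \ Uk arr start 0
      unfold Uk; simp [Ek]
    · show ({start} : Finset Int) = Uk arr start 1
      unfold Uk; simp [Ek]
  | succ k ih =>
    obtain ⟨ih1, ih2⟩ := ih
    have hsub : stepF arr (Ek arr start k \ Uk arr start k) ⊆ Ek arr start (k + 1) :=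
      stepF_mono arr (Finset.sdiff_subset)
    constructor
    · show stepF arr (FV arr start k).1 \ (FV arr start k).2
          = Ek arr start (k + 1) \ Uk arr start (k + 1)
      rw [ih1, ih2]
      apply Finset.Subset.antisymm
      · intro v hv
        obtain ⟨hv1, hv2⟩ := Finset.mem_sdiff.mp hv
        exact Finset.mem_sdiff.mpr ⟨hsub hv1, hv2⟩
      · intro v hv
        refine Finset.mem_sdiff.mpr ⟨cover_step arr start k hv, (Finset.mem_sdiff.mp hv).2⟩
    · show (FV arr start k).2 ∪ stepF arr (FV arr start k).1 = Uk arr start (k + 2)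
      rw [ih1, ih2, Uk_succ arr start (k + 1)]
      apply Finset.Subset.antisymm
      · intro v hv
        rcases Finset.mem_union.mp hv with hv | hv
        · exact Finset.mem_union_left _ hv
        · exact Finset.mem_union_right _ (hsub hv)
      · intro v hv
        rcases Finset.mem_union.mp hv with hv | hv
        · exact Finset.mem_union_left _ hv
        · by_cases hvU : v ∈ Uk arr start (k + 1)
          · exact Finset.mem_union_left _ hvU
          · exact Finset.mem_union_right _
              (cover_step arr start k (Finset.mem_sdiff.mpr ⟨hv, hvU⟩))

-- on the first level where start reappears, it already reappears from the pruned frontier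
theorem hit_iff (arr : List Int) (start : Int) (k : Nat) (hnh : NoHit arr start k) :
    start ∈ Ek arr start (k + 1) ↔ start ∈ stepF arr (FV arr start k).1 := by
  obtain ⟨hF, -⟩ := FV_spec arr start k
  constructor
  · intro hmem
    obtain ⟨u, hu, hmove⟩ := (mem_stepF arr _ start).mp hmem
    have hunew : u ∉ Uk arr start k := by
      intro huU
      obtain ⟨i, hik, hui⟩ := (mem_Uk arr start k u).mp huU
      have : start ∈ Ek arr start (i + 1) :=
        (mem_stepF arr _ start).mpr ⟨u, hui, hmove⟩
      exact hnh (i + 1) (by omega) (by omega) this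
    refine (mem_stepF arr _ start).mpr ⟨u, ?_, hmove⟩
    rw [hF]; exact Finset.mem_sdiff.mpr ⟨hu, hunew⟩
  · intro hmem
    refine stepF_mono arr ?_ hmem
    rw [hF]; exact Finset.sdiff_subset

-- pigeonhole: if start has not reappeared within n levels it never reappears
theorem noHit_forever (arr : List Int) (start : Int)
    (hn : arr ≠ []) (hstart : start ∈ IdxSet arr)
    (hnh : NoHit arr start arr.length) :
    ∀ m : Nat, 1 ≤ m → start ∉ Ek arr start m := by
  have hlen : 1 ≤ arr.length := List.length_pos_iff.mpr hn
  -- every step image lies in the index set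
  have hstep : ∀ S : Finset Int, stepF arr S ⊆ IdxSet arr := by
    intro S j hj
    obtain ⟨u, -, hmove⟩ := (mem_stepF arr S j).mp hj
    have hpos : (0 : Int) < (arr.length : Int) := by exact_mod_cast hlen
    have hlo : 0 ≤ j := by
      rcases hmove with rfl | rfl <;> exact PySem.Int.mod_nonneg _ hpos
    have hhi : j < (arr.length : Int) := by
      rcases hmove with rfl | rfl <;> exact PySem.Int.mod_lt _ hpos
    unfold IdxSet
    refine Finset.mem_image.mpr ⟨j.toNat, Finset.mem_range.mpr ?_, Int.toNat_of_nonneg hlo⟩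
    omega
  -- frontier/visited stay inside the index set
  have hFV : ∀ k, (FV arr start k).1 ⊆ IdxSet arr ∧ (FV arr start k).2 ⊆ IdxSet arr := by
    intro k
    induction k with
    | zero =>
      constructor <;> (intro x hx; simp only [FV, Finset.mem_singleton] at hx; subst hx; exact hstart)
    | succ k ih =>
      obtain ⟨ih1, ih2⟩ := ih
      constructor
      · intro x hx
        exact hstep _ (Finset.mem_sdiff.mp hx).1
      · intro x hx
        rcases Finset.mem_union.mp hx with hx | hx
        · exact ih2 hx
        · exact hstep _ hx
  -- an empty frontier stays empty
  have hempty : ∀ j d, (FV arr start j).1 = ∅ → (FV arr start (j + d)).1 = ∅ := by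
    intro j d
    induction d with
    | zero => intro h; exact h
    | succ d ih =>
      intro h
      have : (FV arr start (j + d)).1 = ∅ := ih h
      show stepF arr (FV arr start (j + d)).1 \ (FV arr start (j + d)).2 = ∅
      rw [this]
      simp [stepF]
  -- visited grows while frontiers are nonempty
  have hgrow : ∀ m, (∀ j, 1 ≤ j → j ≤ m → ((FV arr start j).1).Nonempty) →
      m + 1 ≤ ((FV arr start m).2).card := by
    intro m
    induction m with
    | zero =>
      intro _
      show 1 ≤ ({start} : Finset Int).card
      simp
    | succ m ih =>
      intro h
      obtain ⟨x, hx⟩ := h (m + 1) (by omega) (by omega)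
      obtain ⟨hx1, hx2⟩ := Finset.mem_sdiff.mp hx
      have hsub : insert x (FV arr start m).2 ⊆ (FV arr start (m + 1)).2 := by
        intro y hy
        rcases Finset.mem_insert.mp hy with rfl | hy
        · exact Finset.mem_union_right _ hx1
        · exact Finset.mem_union_left _ hy
      have hcard : ((FV arr start m).2).card + 1 ≤ ((FV arr start (m + 1)).2).card := by
        rw [← Finset.card_insert_of_notMem hx2]
        exact Finset.card_le_card hsub
      have := ih (fun j h1 h2 => h j h1 (by omega))
      omega
  have hIdxCard : (IdxSet arr).card = arr.length := by
    unfold IdxSet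
    rw [Finset.card_image_of_injective _ (fun a b h => by exact_mod_cast h), Finset.card_range]
  -- strong induction on m
  intro m
  induction m using Nat.strong_induction_on with
  | _ m ihm =>
    intro h1m hmem
    by_cases hle : m ≤ arr.length
    · exact hnh m h1m hle hmem
    · -- m = k + 1 with k ≥ arr.length
      obtain ⟨k, rfl⟩ : ∃ k, m = k + 1 := ⟨m - 1, by omega⟩
      have hnhk : NoHit arr start k := by
        intro i hi1 hik
        by_cases hin : i ≤ arr.length
        · exact hnh i hi1 hin
        · exact ihm i (by omega) hi1
      have hstep_mem := (hit_iff arr start k hnhk).mp hmem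
      obtain ⟨u, hu, -⟩ := (mem_stepF arr _ start).mp hstep_mem
      have hne : ∀ j, 1 ≤ j → j ≤ k → ((FV arr start j).1).Nonempty := by
        intro j hj1 hjk
        by_contra hcon
        rw [Finset.not_nonempty_iff_eq_empty] at hcon
        have := hempty j (k - j) hcon
        rw [Nat.add_sub_cancel' hjk] at this
        rw [this] at hu
        exact absurd hu (Finset.notMem_empty u)
      have hge := hgrow k hne
      have hle2 : ((FV arr start k).2).card ≤ (IdxSet arr).card :=
        Finset.card_le_card (hFV k).2
      omega

-- lockstep equality of the two loops
theorem lockstep (arr : List Int) (maxE idx : Int)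
    (hn : arr ≠ []) (hstart : idx ∈ IdxSet arr)
    (hIdx : PySem.List.pyGetD arr idx 0 = maxE) :
    ∀ (d k : Nat) (elems : List (Int × Int)) (vs : PySem.Set Int) (fl : List Int),
      arr.length - k = d → k ≤ arr.length →
      InvA arr elems (Ek arr idx k) →
      fl.toFinset = (FV arr idx k).1 → vs.toFinset = (FV arr idx k).2 →
      NoHit arr idx k →
      ArrayJumpingLoop arr maxE idx elems (k : Int)
        = ArrayJumpingAltLoop arr idx (PySem.List.pyRange ((k : Int) + 1) ((arr.length : Int) + 1) 1) vs fl := by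
  intro d
  induction d with
  | zero =>
    intro k elems vs fl hd hk hInv hfl hvs hnh
    have hkn : k = arr.length := by omega
    subst hkn
    have hrange : PySem.List.pyRange ((arr.length : Int) + 1) ((arr.length : Int) + 1) 1 = [] := by
      rw [PySem.List.pyRange_one]; simp
    rw [hrange]
    have hforever := noHit_forever arr idx hn hstart hnh
    have hInv1 := invA_step arr elems _ hInv
    have hInv2 := invA_step arr _ _ hInv1
    have hno1 : (maxE, idx) ∉ nextElemsA arr elems := fun h =>
      hforever (arr.length + 1) (by omega)
        ((invA_found_iff arr maxE idx hIdx _ _ hInv1).mp h)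
    have hno2 : (maxE, idx) ∉ nextElemsA arr (nextElemsA arr elems) := fun h =>
      hforever (arr.length + 2) (by omega)
        ((invA_found_iff arr maxE idx hIdx _ _ hInv2).mp h)
    rw [ArrayJumpingLoop]
    show (if (maxE, idx) ∈ nextElemsA arr elems then (arr.length : Int) + 1
          else if (arr.length : Int) + 1 > (arr.length : Int) + 1 then -1
          else ArrayJumpingLoop arr maxE idx (nextElemsA arr elems) ((arr.length : Int) + 1)) =
        ArrayJumpingAltLoop arr idx [] vs fl
    rw [if_neg hno1, if_neg (by omega : ¬ ((arr.length : Int) + 1 > (arr.length : Int) + 1))]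
    rw [ArrayJumpingLoop]
    show (if (maxE, idx) ∈ nextElemsA arr (nextElemsA arr elems) then (arr.length : Int) + 1 + 1
          else if (arr.length : Int) + 1 + 1 > (arr.length : Int) + 1 then -1
          else ArrayJumpingLoop arr maxE idx (nextElemsA arr (nextElemsA arr elems))
            ((arr.length : Int) + 1 + 1)) =
        ArrayJumpingAltLoop arr idx [] vs fl
    rw [if_neg hno2, if_pos (by omega : (arr.length : Int) + 1 + 1 > (arr.length : Int) + 1)]
    rfl
  | succ d ih =>
    intro k elems vs fl hd hk hInv hfl hvs hnh
    have hklt : k < arr.length := by omega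
    have hcons : PySem.List.pyRange ((k : Int) + 1) ((arr.length : Int) + 1) 1
        = ((k : Int) + 1) :: PySem.List.pyRange ((k : Int) + 1 + 1) ((arr.length : Int) + 1) 1 :=
      PySem.List.pyRange_one_cons (by exact_mod_cast (by omega : (k : Int) + 1 < (arr.length : Int) + 1))
    rw [hcons]
    have hInv1 := invA_step arr elems _ hInv
    have hfoundA : ((maxE, idx) ∈ nextElemsA arr elems) ↔ idx ∈ Ek arr idx (k + 1) :=
      invA_found_iff arr maxE idx hIdx _ _ hInv1
    have hfoundB : (idx ∈ movesB arr fl) ↔ idx ∈ stepF arr (FV arr idx k).1 := by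
      rw [← List.mem_toFinset, toFinset_movesB, hfl]
    have hiff := hit_iff arr idx k hnh
    rw [ArrayJumpingLoop]
    show (if (maxE, idx) ∈ nextElemsA arr elems then (k : Int) + 1
          else if (k : Int) + 1 > (arr.length : Int) + 1 then -1
          else ArrayJumpingLoop arr maxE idx (nextElemsA arr elems) ((k : Int) + 1)) =
        ArrayJumpingAltLoop arr idx
          (((k : Int) + 1) :: PySem.List.pyRange ((k : Int) + 1 + 1) ((arr.length : Int) + 1) 1) vs fl
    by_cases hA : (maxE, idx) ∈ nextElemsA arr elems
    · have hB : idx ∈ movesB arr fl := hfoundB.mpr (hiff.mp (hfoundA.mp hA))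
      rw [if_pos hA]
      show ((k : Int) + 1) =
        (if idx ∈ movesB arr fl then (k : Int) + 1
         else ArrayJumpingAltLoop arr idx
           (PySem.List.pyRange ((k : Int) + 1 + 1) ((arr.length : Int) + 1) 1)
           (pruneB vs (movesB arr fl)).1 (pruneB vs (movesB arr fl)).2)
      rw [if_pos hB]
    · have hB : idx ∉ movesB arr fl := fun h => hA (hfoundA.mpr (hiff.mpr (hfoundB.mp h)))
      rw [if_neg hA, if_neg (by omega : ¬ ((k : Int) + 1 > (arr.length : Int) + 1))]
      show ArrayJumpingLoop arr maxE idx (nextElemsA arr elems) ((k : Int) + 1) =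
        (if idx ∈ movesB arr fl then (k : Int) + 1
         else ArrayJumpingAltLoop arr idx
           (PySem.List.pyRange ((k : Int) + 1 + 1) ((arr.length : Int) + 1) 1)
           (pruneB vs (movesB arr fl)).1 (pruneB vs (movesB arr fl)).2)
      rw [if_neg hB]
      obtain ⟨hp1, hp2⟩ := pruneB_spec arr vs (movesB arr fl)
      have hfl' : (pruneB vs (movesB arr fl)).2.toFinset = (FV arr idx (k + 1)).1 := by
        rw [hp2, toFinset_movesB, hfl, hvs]
        rfl
      have hvs' : (pruneB vs (movesB arr fl)).1.toFinset = (FV arr idx (k + 1)).2 := by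
        rw [hp1, toFinset_movesB, hfl, hvs]
        rfl
      have hnh' : NoHit arr idx (k + 1) := by
        intro i hi1 hi2
        by_cases hik : i ≤ k
        · exact hnh i hi1 hik
        · have : i = k + 1 := by omega
          subst this
          exact fun h => hA (hfoundA.mpr h)
      have hrec := ih (k + 1) (nextElemsA arr elems) (pruneB vs (movesB arr fl)).1
        (pruneB vs (movesB arr fl)).2 (by omega) (by omega) hInv1 hfl' hvs' hnh'
      push_cast at hrec
      exact hrec

-- ===== VERDICT (by name: the statement is the Claim_ definition above) =====
theorem ArrayJumping_spec : Claim_equal_ArrayJumping := by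
  intro arr _ hpre
  unfold Spec_ArrayJumping ArrayJumping ArrayJumping_alt
  cases hmax : PySem.List.max? arr (fun x => x) with
  | none => rfl
  | some maxE =>
    simp only []
    have hmem : maxE ∈ arr := PySem.List.max?_mem hmax
    have hsome : (PySem.List.index? arr maxE).isSome :=
      (PySem.List.index?_isSome_iff arr maxE).mpr hmem
    obtain ⟨k, hk⟩ := Option.isSome_iff_exists.mp hsome
    obtain ⟨hklt, hget, -⟩ := PySem.List.getElem_of_index?_eq_some hk
    have hidxk : (((PySem.List.index? arr maxE).getD 0 : Nat) : Int) = (k : Int) := by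
      rw [hk]; simp
    rw [hidxk]
    have hIdx : PySem.List.pyGetD arr ((k : Nat) : Int) 0 = maxE := by
      rw [PySem.List.pyGetD_natCast]
      simp [List.getD, hklt, hget]
    have hstart : ((k : Nat) : Int) ∈ IdxSet arr := by
      unfold IdxSet
      exact Finset.mem_image.mpr ⟨k, Finset.mem_range.mpr hklt, rfl⟩
    have hInv0 : InvA arr [(maxE, ((k : Nat) : Int))] (Ek arr ((k : Nat) : Int) 0) := by
      constructor
      · intro p hp
        simp only [List.mem_singleton] at hp
        subst hp
        exact hIdx.symm
      · intro j
        show _ ↔ j ∈ ({((k : Nat) : Int)} : Finset Int)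
        simp [eq_comm]
    have hfl0 : ([((k : Nat) : Int)] : List Int).toFinset = (FV arr ((k : Nat) : Int) 0).1 := by
      show _ = ({((k : Nat) : Int)} : Finset Int)
      simp
    have hvs0 : (PySem.Set.ofList [((k : Nat) : Int)]).toFinset = (FV arr ((k : Nat) : Int) 0).2 := by
      have hof : PySem.Set.ofList [((k : Nat) : Int)] = [((k : Nat) : Int)] :=
        PySem.Set.ofList_eq_self_of_nodup _ (List.nodup_singleton _)
      rw [hof]
      show _ = ({((k : Nat) : Int)} : Finset Int)
      simp
    have hnh0 : NoHit arr ((k : Nat) : Int) 0 := by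
      intro i hi1 hi2
      omega
    have h0 := lockstep arr maxE ((k : Nat) : Int) hpre hstart hIdx arr.length 0
      [(maxE, ((k : Nat) : Int))] (PySem.Set.ofList [((k : Nat) : Int)]) [((k : Nat) : Int)]
      (by omega) (by omega) hInv0 hfl0 hvs0 hnh0
    push_cast at h0
    simpa using h0
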